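-- pv_equiv track=rewrite | github.com/drdh/Courses | Compiler/CSA/2018f/CPython/demo/src/Hook.py | balance_split
-- ===== SOURCE A (Python) =====
-- def balance_split(origin: str, flag: str):
--     balance = 0
--     parts = []
--     target = origin
--     end = False
--     leng = len(flag)
--
--     while not end:
--         end = True
--         for i in range(len(target)):
--             if target[i] == '<':
--                 balance += 1
--             elif target[i] == '>':
--                 balance -= 1
--             elif target[i:i + leng] == flag and balance == 0:
--                 parts.append(target[:i])
--                 target = target[i + leng:]
--                 end = False
--                 break
--
--     parts.append(target)
--     return tuple(parts)
-- ===== SOURCE B (Python) =====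
-- def balance_split(origin: str, flag: str):
--     # One left-to-right pass: track bracket balance and build the current part,
--     # cutting at each zero-balance occurrence of flag (no restart after a split).
--     leng = len(flag)
--     parts = []
--     cur = []
--     bal = 0
--     i = 0
--     n = len(origin)
--     while i < n:
--         c = origin[i]
--         if c == '<':
--             bal += 1
--             cur.append(c)
--             i += 1
--         elif c == '>':
--             bal -= 1
--             cur.append(c)
--             i += 1
--         elif bal == 0 and origin.startswith(flag, i):
--             parts.append(''.join(cur))
--             cur = []
--             i += leng
--         else:
--             cur.append(c)
--             i += 1
--     parts.append(''.join(cur))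
--     return tuple(parts)
-- ===== Notes on version B (the rewrite author's own statement) =====
-- stated objective: faster
-- what changed: A restarts a full scan of the remaining string (with fresh slicing) after every split; B makes one left-to-right pass that keeps the bracket balance and the current part across splits, so no character is rescanned.
-- outside the precondition, e.g. on balance_split('<>', ''): A returns ('<>',), B returns ('<>',)
import Mathlib
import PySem

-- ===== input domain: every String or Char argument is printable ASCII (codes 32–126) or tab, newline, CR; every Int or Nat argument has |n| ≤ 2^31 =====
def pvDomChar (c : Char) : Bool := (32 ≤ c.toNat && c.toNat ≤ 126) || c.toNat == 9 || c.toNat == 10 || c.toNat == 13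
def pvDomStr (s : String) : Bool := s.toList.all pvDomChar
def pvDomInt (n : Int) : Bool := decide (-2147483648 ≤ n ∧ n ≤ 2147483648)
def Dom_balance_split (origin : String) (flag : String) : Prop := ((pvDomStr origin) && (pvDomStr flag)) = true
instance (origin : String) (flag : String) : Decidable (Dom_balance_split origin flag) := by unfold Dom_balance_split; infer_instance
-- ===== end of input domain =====

-- B replaces A's restart-after-every-split rescan by one left-to-right pass that keeps the
-- bracket balance and the current part across splits (objective: faster).

-- ===== PORT A =====
-- A's inner `for i in range(len(target))`: scan from index i; the slices target[:i],
-- target[i:i+leng], target[i+leng:] have nonnegative indices, so take/drop is exact.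
def pvInnerA (flagL : List Char) (target : List Char) (bal : Int) (i : Nat) :
    Option (List Char × List Char × Int) :=
  if h : i < target.length then
    if target[i] = '<' then pvInnerA flagL target (bal + 1) (i + 1)
    else if target[i] = '>' then pvInnerA flagL target (bal - 1) (i + 1)
    else if (target.drop i).take flagL.length = flagL ∧ bal = 0 then
      some (target.take i, target.drop (i + flagL.length), bal)
    else pvInnerA flagL target bal (i + 1)
  else none
  termination_by target.length - i

-- A's outer `while not end` loop; the fuel only makes the loop total (it diverges in Python
-- for flag = "") and is never exhausted on inputs satisfying Pre_.
def pvLoopA (flagL : List Char) : Nat → List (List Char) → List Char → Int → List (List Char)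
  | 0, parts, target, _ => parts ++ [target]
  | fuel + 1, parts, target, bal =>
    match pvInnerA flagL target bal 0 with
    | none => parts ++ [target]
    | some (p, t', b) => pvLoopA flagL fuel (parts ++ [p]) t' b

def balance_split (origin : String) (flag : String) : List String :=
  (pvLoopA flag.toList (origin.toList.length + 1) [] origin.toList 0).map String.ofList

-- ===== PORT B =====
-- B's single `while i < n` pass, as structural recursion on the remaining suffix;
-- `origin.startswith(flag, i)` is take/compare on the suffix. Fuel as in A (unreachable on Pre_).
def pvGoB (flagL : List Char) : Nat → List Char → Int → List Char → List (List Char) → List (List Char)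
  | _, [], _, cur, parts => parts ++ [cur]
  | 0, _ :: _, _, cur, parts => parts ++ [cur]
  | fuel + 1, c :: rest, bal, cur, parts =>
    if c = '<' then pvGoB flagL fuel rest (bal + 1) (cur ++ [c]) parts
    else if c = '>' then pvGoB flagL fuel rest (bal - 1) (cur ++ [c]) parts
    else if bal = 0 ∧ (c :: rest).take flagL.length = flagL then
      pvGoB flagL fuel ((c :: rest).drop flagL.length) bal [] (parts ++ [cur])
    else pvGoB flagL fuel rest bal (cur ++ [c]) parts

def balance_split_alt (origin : String) (flag : String) : List String :=
  (pvGoB flag.toList origin.toList.length origin.toList 0 [] []).map String.ofList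

-- ===== PRECONDITION & SPEC =====
-- Pre_ excludes the empty flag, on which A's while-loop spins forever (a split consumes zero
-- characters) whenever origin has a non-bracket character at zero balance.
def Pre_balance_split (origin : String) (flag : String) : Prop := flag ≠ ""
instance (origin : String) (flag : String) : Decidable (Pre_balance_split origin flag) := by
  unfold Pre_balance_split; infer_instance

def pvWitness_balance_split : String × String := ("a*<b*>c*", "*")

def Spec_balance_split (origin : String) (flag : String) (out : List String) : Prop := out = balance_split_alt origin flag
instance (origin : String) (flag : String) (out : List String) : Decidable (Spec_balance_split origin flag out) := by unfold Spec_balance_split; infer_instance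

-- ===== CLAIM (what is proved, stated in full; the proofs are below) =====
def Claim_equal_balance_split : Prop := ∀ (origin : String) (flag : String), Dom_balance_split origin flag → Pre_balance_split origin flag → Spec_balance_split origin flag (balance_split origin flag)

-- ===== LEMMAS AND PROOFS =====

lemma pvLoopA_acc (flagL : List Char) : ∀ (fa : Nat) (parts : List (List Char)) (t : List Char) (bal : Int),
    pvLoopA flagL fa parts t bal = parts ++ pvLoopA flagL fa [] t bal := by
  intro fa
  induction fa with
  | zero => intro parts t bal; simp [pvLoopA]
  | succ f ih =>
    intro parts t bal
    simp only [pvLoopA]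
    cases h : pvInnerA flagL t bal 0 with
    | none => simp
    | some x =>
      obtain ⟨p, t', b⟩ := x
      show pvLoopA flagL f (parts ++ [p]) t' b = parts ++ pvLoopA flagL f ([] ++ [p]) t' b
      rw [ih (parts ++ [p]), ih ([] ++ [p])]
      simp

lemma pvInnerA_shape (flagL t : List Char) : ∀ (k i : Nat) (bal : Int) (p t' : List Char) (b : Int),
    t.length - i ≤ k → pvInnerA flagL t bal i = some (p, t', b) →
    ∃ j, i ≤ j ∧ j < t.length ∧ p = t.take j ∧ t' = t.drop (j + flagL.length) := by
  intro k
  induction k with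
  | zero =>
    intro i bal p t' b hk hs
    rw [pvInnerA, dif_neg (by omega)] at hs
    exact absurd hs (by simp)
  | succ k ih =>
    intro i bal p t' b hk hs
    by_cases h : i < t.length
    · rw [pvInnerA, dif_pos h] at hs
      split_ifs at hs with h1 h2 h3
      · obtain ⟨j, hj1, hj2, hj3, hj4⟩ := ih (i + 1) (bal + 1) p t' b (by omega) hs
        exact ⟨j, by omega, hj2, hj3, hj4⟩
      · obtain ⟨j, hj1, hj2, hj3, hj4⟩ := ih (i + 1) (bal - 1) p t' b (by omega) hs
        exact ⟨j, by omega, hj2, hj3, hj4⟩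
      · simp only [Option.some.injEq, Prod.mk.injEq] at hs
        exact ⟨i, le_refl i, h, hs.1.symm, hs.2.1.symm⟩
      · obtain ⟨j, hj1, hj2, hj3, hj4⟩ := ih (i + 1) bal p t' b (by omega) hs
        exact ⟨j, by omega, hj2, hj3, hj4⟩
    · rw [pvInnerA, dif_neg h] at hs
      exact absurd hs (by simp)

lemma pvGoB_fuel (flagL : List Char) (hf : flagL ≠ []) : ∀ (n : Nat) (t : List Char) (f g : Nat)
    (bal : Int) (cur : List Char) (parts : List (List Char)),
    t.length ≤ n → t.length ≤ f → t.length ≤ g →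
    pvGoB flagL f t bal cur parts = pvGoB flagL g t bal cur parts := by
  have hl : 0 < flagL.length := List.length_pos_iff.mpr hf
  intro n
  induction n with
  | zero =>
    intro t f g bal cur parts hn _ _
    have ht : t = [] := List.eq_nil_iff_length_eq_zero.mpr (by omega)
    subst ht
    cases f <;> cases g <;> rfl
  | succ n ih =>
    intro t f g bal cur parts hn hfu hg
    cases t with
    | nil => cases f <;> cases g <;> rfl
    | cons c rest =>
      simp only [List.length_cons] at hn hfu hg
      obtain ⟨f', rfl⟩ : ∃ f', f = f' + 1 := ⟨f - 1, by omega⟩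
      obtain ⟨g', rfl⟩ : ∃ g', g = g' + 1 := ⟨g - 1, by omega⟩
      simp only [pvGoB]
      split_ifs with h1 h2 h3
      · exact ih rest f' g' _ _ _ (by omega) (by omega) (by omega)
      · exact ih rest f' g' _ _ _ (by omega) (by omega) (by omega)
      · exact ih _ f' g' _ _ _ (by simp [List.length_drop]; omega)
          (by simp [List.length_drop]; omega) (by simp [List.length_drop]; omega)
      · exact ih rest f' g' _ _ _ (by omega) (by omega) (by omega)

lemma pvTakeDropCons (t : List Char) (i j : Nat) (hij : i < j) (hi : i < t.length) :
    (t.take j).drop i = t[i] :: (t.take j).drop (i + 1) := by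
  have h1 : (t.take j).drop i = (t.drop i).take (j - i) := List.drop_take
  have h2 : (t.take j).drop (i + 1) = (t.drop (i + 1)).take (j - (i + 1)) := List.drop_take
  rw [h1, h2, List.drop_eq_getElem_cons hi,
    show j - i = (j - (i + 1)) + 1 from by omega, List.take_succ_cons]

lemma pvSub (flagL : List Char) (hf : flagL ≠ []) (t : List Char) : ∀ (k i : Nat) (bal : Int)
    (cur : List Char) (parts : List (List Char)) (fb : Nat),
    t.length - i ≤ k → t.length - i ≤ fb →
    (pvInnerA flagL t bal i = none →
        pvGoB flagL fb (t.drop i) bal cur parts = parts ++ [cur ++ t.drop i]) ∧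
    (∀ p t' b g, pvInnerA flagL t bal i = some (p, t', b) → t'.length ≤ g →
        pvGoB flagL fb (t.drop i) bal cur parts = pvGoB flagL g t' b [] (parts ++ [cur ++ p.drop i])) := by
  have hl : 0 < flagL.length := List.length_pos_iff.mpr hf
  intro k
  induction k with
  | zero =>
    intro i bal cur parts fb hk _
    have h : ¬ i < t.length := by omega
    have hd : t.drop i = [] := List.drop_eq_nil_of_le (by omega)
    constructor
    · intro _
      rw [hd]
      cases fb <;> simp [pvGoB]
    · intro p t' b g hs _
      rw [pvInnerA, dif_neg h] at hs
      exact absurd hs (by simp)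
  | succ k ih =>
    intro i bal cur parts fb hk hfb
    by_cases h : i < t.length
    · have hdrop : t.drop i = t[i] :: t.drop (i + 1) := List.drop_eq_getElem_cons h
      obtain ⟨fb', rfl⟩ : ∃ fb', fb = fb' + 1 := ⟨fb - 1, by omega⟩
      constructor
      · intro hnone
        rw [pvInnerA, dif_pos h] at hnone
        rw [hdrop]
        simp only [pvGoB]
        by_cases h1 : t[i] = '<'
        · rw [if_pos h1] at hnone ⊢
          rw [(ih (i + 1) (bal + 1) (cur ++ [t[i]]) parts fb' (by omega) (by omega)).1 hnone]
          simp
        · rw [if_neg h1] at hnone ⊢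
          by_cases h2 : t[i] = '>'
          · rw [if_pos h2] at hnone ⊢
            rw [(ih (i + 1) (bal - 1) (cur ++ [t[i]]) parts fb' (by omega) (by omega)).1 hnone]
            simp
          · rw [if_neg h2] at hnone ⊢
            by_cases h3 : (t.drop i).take flagL.length = flagL ∧ bal = 0
            · rw [if_pos h3] at hnone
              exact absurd hnone (by simp)
            · rw [if_neg h3] at hnone
              rw [if_neg (by rw [← hdrop]; tauto)]
              rw [(ih (i + 1) bal (cur ++ [t[i]]) parts fb' (by omega) (by omega)).1 hnone]
              simp
      · intro p t' b g hs hg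
        rw [pvInnerA, dif_pos h] at hs
        rw [hdrop]
        simp only [pvGoB]
        by_cases h1 : t[i] = '<'
        · rw [if_pos h1] at hs ⊢
          obtain ⟨j, hj1, hj2, rfl, rfl⟩ :=
            pvInnerA_shape flagL t t.length (i + 1) (bal + 1) p t' b (by omega) hs
          rw [(ih (i + 1) (bal + 1) (cur ++ [t[i]]) parts fb' (by omega) (by omega)).2 _ _ _ g hs hg]
          rw [pvTakeDropCons t i j (by omega) h]
          simp
        · rw [if_neg h1] at hs ⊢
          by_cases h2 : t[i] = '>'
          · rw [if_pos h2] at hs ⊢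
            obtain ⟨j, hj1, hj2, rfl, rfl⟩ :=
              pvInnerA_shape flagL t t.length (i + 1) (bal - 1) p t' b (by omega) hs
            rw [(ih (i + 1) (bal - 1) (cur ++ [t[i]]) parts fb' (by omega) (by omega)).2 _ _ _ g hs hg]
            rw [pvTakeDropCons t i j (by omega) h]
            simp
          · rw [if_neg h2] at hs ⊢
            by_cases h3 : (t.drop i).take flagL.length = flagL ∧ bal = 0
            · rw [if_pos h3] at hs
              simp only [Option.some.injEq, Prod.mk.injEq] at hs
              obtain ⟨hp, ht', hb⟩ := hs
              subst hp; subst ht'; subst hb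
              rw [if_pos (by rw [← hdrop]; tauto)]
              rw [← hdrop, List.drop_drop]
              have hpd : (t.take i).drop i = [] := by
                rw [List.drop_take]
                simp
              rw [hpd, List.append_nil]
              have hlen : (t.drop (i + flagL.length)).length ≤ t.length - i - 1 := by
                simp only [List.length_drop]
                omega
              apply pvGoB_fuel flagL hf t.length
              · simp [List.length_drop]
              · omega
              · simpa using hg
            · rw [if_neg h3] at hs
              rw [if_neg (by rw [← hdrop]; tauto)]
              obtain ⟨j, hj1, hj2, rfl, rfl⟩ :=
                pvInnerA_shape flagL t t.length (i + 1) bal p t' b (by omega) hs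
              rw [(ih (i + 1) bal (cur ++ [t[i]]) parts fb' (by omega) (by omega)).2 _ _ _ g hs hg]
              rw [pvTakeDropCons t i j (by omega) h]
              simp
    · have hd : t.drop i = [] := List.drop_eq_nil_of_le (by omega)
      constructor
      · intro _
        rw [hd]
        cases fb <;> simp [pvGoB]
      · intro p t' b g hs _
        rw [pvInnerA, dif_neg h] at hs
        exact absurd hs (by simp)

lemma pvKey (flagL : List Char) (hf : flagL ≠ []) : ∀ (n : Nat) (t : List Char) (bal : Int)
    (cur : List Char) (parts : List (List Char)) (fa fb : Nat),
    t.length ≤ n → t.length < fa → t.length ≤ fb →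
    pvGoB flagL fb t bal cur parts = parts ++ (pvLoopA flagL fa [] t bal).modifyHead (cur ++ ·) := by
  have hl : 0 < flagL.length := List.length_pos_iff.mpr hf
  intro n
  induction n with
  | zero =>
    intro t bal cur parts fa fb hn hfa hfb
    have ht : t = [] := List.eq_nil_iff_length_eq_zero.mpr (by omega)
    subst ht
    obtain ⟨fa', rfl⟩ : ∃ fa', fa = fa' + 1 := ⟨fa - 1, by omega⟩
    have hi : pvInnerA flagL [] bal 0 = none := by rw [pvInnerA, dif_neg (by simp)]
    simp only [pvLoopA, hi]
    cases fb <;> simp [pvGoB]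
  | succ n ih =>
    intro t bal cur parts fa fb hn hfa hfb
    obtain ⟨fa', rfl⟩ : ∃ fa', fa = fa' + 1 := ⟨fa - 1, by omega⟩
    simp only [pvLoopA]
    cases hi : pvInnerA flagL t bal 0 with
    | none =>
      have := (pvSub flagL hf t t.length 0 bal cur parts fb (by omega) (by omega)).1 hi
      simp only [List.drop_zero] at this
      rw [this]
      simp
    | some x =>
      obtain ⟨p, t', b⟩ := x
      obtain ⟨j, _, hj2, hp, ht'⟩ := pvInnerA_shape flagL t t.length 0 bal p t' b (by omega) hi
      have ht'len : t'.length < t.length := by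
        rw [ht']
        simp only [List.length_drop]
        omega
      have hstep := (pvSub flagL hf t t.length 0 bal cur parts fb (by omega) (by omega)).2
        p t' b t'.length hi (le_refl _)
      simp only [List.drop_zero] at hstep
      rw [hstep]
      rw [ih t' b [] (parts ++ [cur ++ p]) fa' t'.length (by omega) (by omega) (le_refl _)]
      show _ = parts ++ (pvLoopA flagL fa' ([] ++ [p]) t' b).modifyHead (cur ++ ·)
      rw [pvLoopA_acc flagL fa' ([] ++ [p]) t' b]
      have hid : (fun x : List Char => x) = id := rfl
      simp only [List.nil_append, List.singleton_append, List.modifyHead_cons, List.append_assoc]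
      simp [hid, List.modifyHead_id]

-- ===== VERDICT (by name: the statement is the Claim_ definition above) =====
theorem balance_split_spec : Claim_equal_balance_split := by
  intro origin flag _ hpre
  unfold Spec_balance_split balance_split balance_split_alt
  have hf : flag.toList ≠ [] := fun h => hpre (String.toList_eq_nil_iff.mp h)
  congr 1
  rw [pvKey flag.toList hf origin.toList.length origin.toList 0 [] []
      (origin.toList.length + 1) origin.toList.length (le_refl _) (by omega) (le_refl _)]
  have hid : (fun x : List Char => [] ++ x) = id := by funext x; simp
  rw [hid, List.modifyHead_id]
  simp
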